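-- pv_equiv track=rewrite | github.com/olegyuziv/Advent-of-code-2023 | AOC_3/AOC_3_P1.py | create_validity_map
-- ===== SOURCE A (Python) =====
-- def get_surrounding_cells(x, y):
--     """
--     Generates the coordinates of surrounding cells in a grid around (x, y).
--
--     :param x: X-coordinate of the center cell.
--     :param y: Y-coordinate of the center cell.
--     :return: Generator for coordinates of surrounding cells.
--     """
--     # List of relative positions around the cell
--     neighbor_offsets = [(-1, -1), (-1, 0), (-1, 1), (0, -1), (0, 1), (1, -1), (1, 0), (1, 1)]
--     for dx, dy in neighbor_offsets:
--         yield x + dx, y + dy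
--
-- def create_validity_map(engine_map):
--     """
--     Creates a map indicating valid part numbers in the engine map.
--
--     :param engine_map: The engine map as a list of strings.
--     :return: 2D list indicating valid parts (1 for valid, 0 for invalid).
--     """
--     validity_map = [[0] * len(engine_map[0]) for _ in engine_map]
--     for y, row in enumerate(engine_map):
--         for x, char in enumerate(row):
--             if char not in ".0123456789":
--                 for nx, ny in get_surrounding_cells(x, y):
--                     if 0 <= nx < len(row) and 0 <= ny < len(engine_map):
--                         validity_map[ny][nx] = 1
--     return validity_map
-- ===== SOURCE B (Python) =====
-- def create_validity_map(engine_map):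
--     """Separable formulation: per row, build 1-D dilation masks (side = a symbol directly
--     left or right in the same row, full = a symbol within one column), then each output
--     row ORs its own side mask with the full masks of the rows above and below."""
--     height = len(engine_map)
--     width = len(engine_map[0]) if engine_map else 0
--     side_masks, full_masks = [], []
--     for row in engine_map:
--         n = len(row)
--         side, full = [False] * n, [False] * n
--         for x, ch in enumerate(row):
--             if ch not in ".0123456789":
--                 for nx in (x - 1, x + 1):
--                     if 0 <= nx < n:
--                         side[nx] = True
--                 for nx in (x - 1, x, x + 1):
--                     if 0 <= nx < n:
--                         full[nx] = True
--         side_masks.append(side)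
--         full_masks.append(full)
--
--     def hit(masks, j, i):
--         return 0 <= j < height and i < len(masks[j]) and masks[j][i]
--
--     return [[int(hit(side_masks, j, i) or hit(full_masks, j - 1, i) or hit(full_masks, j + 1, i))
--              for i in range(width)] for j in range(height)]
-- ===== Notes on version B (the rewrite author's own statement) =====
-- stated objective: alternative
-- what changed: Replaces A's scatter (each symbol mutates the neighbour cells of a pre-built 2D zero grid) by a separable two-phase algorithm: per row, 1-D dilation masks (side = symbol directly left/right, full = symbol within one column), then each output row is rendered by OR-ing its own side mask with the full masks of the adjacent rows; no 2D mutation at all.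
import Mathlib
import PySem

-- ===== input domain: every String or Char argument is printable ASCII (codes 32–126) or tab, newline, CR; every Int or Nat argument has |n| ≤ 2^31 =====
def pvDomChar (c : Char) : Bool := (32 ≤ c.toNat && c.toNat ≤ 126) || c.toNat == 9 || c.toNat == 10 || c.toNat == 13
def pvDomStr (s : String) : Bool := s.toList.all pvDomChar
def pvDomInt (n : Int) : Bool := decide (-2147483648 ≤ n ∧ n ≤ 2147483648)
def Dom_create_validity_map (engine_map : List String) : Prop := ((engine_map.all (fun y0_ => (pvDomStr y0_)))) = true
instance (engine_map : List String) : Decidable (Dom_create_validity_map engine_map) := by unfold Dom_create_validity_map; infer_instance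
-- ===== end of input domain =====

-- B inverts A's scatter (each symbol writes 1 into the neighbours of a zero grid) into a gather
-- (each cell reads its own 8-neighbourhood); outside the D_ corner the two agree on all of Pre_.

-- ===== PORT A =====
-- neighbor_offsets, in order
def cvm_offsets : List (Int × Int) :=
  [(-1,-1),(-1,0),(-1,1),(0,-1),(0,1),(1,-1),(1,0),(1,1)]

-- get_surrounding_cells(x, y): the generator, materialised as a list (yields (x+dx, y+dy))
def get_surrounding_cells (x y : Int) : List (Int × Int) :=
  cvm_offsets.map (fun d => (x + d.1, y + d.2))

-- validity_map[ny][nx] = 1  (A's guard keeps both indices in range on Pre_; out of range,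
-- List.set is the identity where Python would raise — such inputs are excluded by Pre_)
def cvm_set2 (m : List (List Int)) (ny nx : Nat) : List (List Int) :=
  m.set ny ((m.getD ny []).set nx 1)

-- 'char not in ".0123456789"': for a single character Python's substring test is element membership
def create_validity_map (engine_map : List String) : List (List Int) :=
  -- len(engine_map[0]): evaluated only per row of the comprehension, so [] returns []; headD matches
  let w := (engine_map.headD "").toList.length
  let init : List (List Int) := engine_map.map (fun _ => List.replicate w 0)
  (PySem.List.enumerate engine_map 0).foldl (fun m p =>
    (PySem.List.enumerate p.2.toList 0).foldl (fun m q =>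
      if q.2 ∉ (".0123456789".toList) then
        (get_surrounding_cells q.1 p.1).foldl (fun m c =>
          if 0 ≤ c.1 ∧ c.1 < (p.2.toList.length : Int) ∧ 0 ≤ c.2 ∧ c.2 < (engine_map.length : Int)
          then cvm_set2 m c.2.toNat c.1.toNat
          else m) m
      else m) m) init

-- ===== PORT B =====
-- per-row masks: side[nx] = a symbol directly left/right of nx in this row,
-- full[nx] = a symbol within one column of nx in this row (the two inner for-loops)
def cvm_masks (r : List Char) : List Bool × List Bool :=
  (PySem.List.enumerate r 0).foldl (fun (sf : List Bool × List Bool) q =>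
    if q.2 ∉ (".0123456789".toList) then
      ([q.1 - 1, q.1 + 1].foldl (fun m nx =>
          if 0 ≤ nx ∧ nx < (r.length : Int) then m.set nx.toNat true else m) sf.1,
       [q.1 - 1, q.1, q.1 + 1].foldl (fun m nx =>
          if 0 ≤ nx ∧ nx < (r.length : Int) then m.set nx.toNat true else m) sf.2)
    else sf)
    (List.replicate r.length false, List.replicate r.length false)

-- hit(masks, j, i): '0 <= j < height and i < len(masks[j]) and masks[j][i]'
-- (height = len(engine_map) = masks.length; getD only totalises the guarded accesses)
def cvm_hit (masks : List (List Bool)) (j : Int) (i : Nat) : Bool :=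
  decide (0 ≤ j ∧ j < (masks.length : Int)) &&
  decide (i < (masks.getD j.toNat []).length) &&
  (masks.getD j.toNat []).getD i false

-- 'len(engine_map[0]) if engine_map else 0' = headD "" length
def create_validity_map_alt (engine_map : List String) : List (List Int) :=
  let h := engine_map.length
  let w := (engine_map.headD "").toList.length
  let side := engine_map.map (fun r => (cvm_masks r.toList).1)
  let full := engine_map.map (fun r => (cvm_masks r.toList).2)
  (List.range h).map (fun (j : Nat) =>
    (List.range w).map (fun (i : Nat) =>
      if cvm_hit side (j : Int) i || cvm_hit full ((j : Int) - 1) i ||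
         cvm_hit full ((j : Int) + 1) i
      then (1 : Int) else 0))

-- ===== PRECONDITION & SPEC =====
-- Pre_ is exactly A's domain: A raises IndexError iff some symbol would mark a neighbour column
-- at index ≥ len(engine_map[0]), the width of the validity rows (only ragged inputs can do that).
def Pre_create_validity_map (engine_map : List String) : Prop :=
  ∀ y : Nat, y < engine_map.length →
    ∀ x : Nat, x < (engine_map.getD y "").toList.length →
      (engine_map.getD y "").toList.getD x '.' ∉ (".0123456789".toList) →
        (x < (engine_map.headD "").toList.length ∧
          (x + 1 < (engine_map.getD y "").toList.length →
            x + 1 < (engine_map.headD "").toList.length))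
instance (engine_map : List String) : Decidable (Pre_create_validity_map engine_map) := by
  unfold Pre_create_validity_map; infer_instance

def pvWitness_create_validity_map : List String := ["$.", ".."]

def Spec_create_validity_map (engine_map : List String) (out : List (List Int)) : Prop :=
  out = create_validity_map_alt engine_map
instance (engine_map : List String) (out : List (List Int)) :
    Decidable (Spec_create_validity_map engine_map out) := by
  unfold Spec_create_validity_map; infer_instance

-- ===== CLAIM (what is proved, stated in full; the proofs are below) =====
def Claim_equal_create_validity_map : Prop :=
  ∀ (engine_map : List String), Dom_create_validity_map engine_map →
    Pre_create_validity_map engine_map →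
      Spec_create_validity_map engine_map (create_validity_map engine_map)

-- ===== LEMMAS AND PROOFS =====
def cvm_get2 (m : List (List Int)) (j i : Nat) : Int := (m.getD j []).getD i 0

lemma cvm_get2_set2_self (m : List (List Int)) (ny nx : Nat) (h1 : ny < m.length)
    (h2 : nx < (m.getD ny []).length) : cvm_get2 (cvm_set2 m ny nx) ny nx = 1 := by
  simp only [cvm_get2, cvm_set2, List.getD_eq_getElem?_getD, List.getElem?_set_self h1] at *
  simp [h2]

lemma cvm_get2_set2_ne (m : List (List Int)) (ny nx j i : Nat) (h : ¬(j = ny ∧ i = nx)) :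
    cvm_get2 (cvm_set2 m ny nx) j i = cvm_get2 m j i := by
  simp only [cvm_get2, cvm_set2, List.getD_eq_getElem?_getD]
  by_cases hj : ny = j
  · subst hj
    have hi : nx ≠ i := by tauto
    by_cases hlen : ny < m.length
    · rw [List.getElem?_set_self hlen]
      simp [List.getElem?_set_ne hi]
    · rw [List.set_eq_of_length_le (Nat.le_of_not_lt hlen)]
  · rw [List.getElem?_set_ne hj]

lemma cvm_set2_length (m : List (List Int)) (ny nx : Nat) :
    (cvm_set2 m ny nx).length = m.length := by simp [cvm_set2]

lemma cvm_set2_rowlen (m : List (List Int)) (ny nx j : Nat) :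
    ((cvm_set2 m ny nx).getD j []).length = (m.getD j []).length := by
  simp only [cvm_set2, List.getD_eq_getElem?_getD, List.getElem?_set]
  split_ifs with h1 h2 <;> simp_all

lemma cvm_fold_length (ps : List (Nat × Nat)) (m : List (List Int)) :
    (ps.foldl (fun m p => cvm_set2 m p.1 p.2) m).length = m.length := by
  induction ps generalizing m with
  | nil => rfl
  | cons p ps ih => rw [List.foldl_cons, ih, cvm_set2_length]

lemma cvm_fold_rowlen (ps : List (Nat × Nat)) (m : List (List Int)) (j : Nat) :
    ((ps.foldl (fun m p => cvm_set2 m p.1 p.2) m).getD j []).length =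
      (m.getD j []).length := by
  induction ps generalizing m with
  | nil => rfl
  | cons p ps ih => rw [List.foldl_cons, ih, cvm_set2_rowlen]

lemma cvm_get2_fold (ps : List (Nat × Nat)) (m : List (List Int)) (j i : Nat)
    (hb : ∀ p ∈ ps, p.1 < m.length ∧ p.2 < (m.getD p.1 []).length) :
    cvm_get2 (ps.foldl (fun m p => cvm_set2 m p.1 p.2) m) j i =
      if (j, i) ∈ ps then 1 else cvm_get2 m j i := by
  induction ps generalizing m with
  | nil => simp
  | cons p ps ih =>
    rw [List.foldl_cons]
    have hb' : ∀ q ∈ ps, q.1 < (cvm_set2 m p.1 p.2).length ∧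
        q.2 < ((cvm_set2 m p.1 p.2).getD q.1 []).length := by
      intro q hq
      rw [cvm_set2_length, cvm_set2_rowlen]
      exact hb q (List.mem_cons_of_mem _ hq)
    rw [ih _ hb']
    by_cases hmem : (j, i) ∈ ps
    · simp [hmem]
    · by_cases hp : (j, i) = p
      · have hhead := hb p List.mem_cons_self
        rw [← hp] at hhead ⊢
        simp [hmem, cvm_get2_set2_self m j i hhead.1 hhead.2]
      · have : ¬(j = p.1 ∧ i = p.2) := by
          intro hc; exact hp (Prod.ext hc.1 hc.2)
        simp [hmem, hp, cvm_get2_set2_ne m p.1 p.2 j i this]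

lemma cvm_get2_eq_getElem (m : List (List Int)) (j i : Nat) (hj : j < m.length)
    (hi : i < m[j].length) : cvm_get2 m j i = m[j][i] := by
  rw [cvm_get2, List.getD_eq_getElem _ _ hj, List.getD_eq_getElem _ _ hi]

lemma cvm_foldl_flatMap {α β γ : Type} (l : List α) (f : α → List β) (step : γ → β → γ)
    (m : γ) : (l.flatMap f).foldl step m = l.foldl (fun m a => (f a).foldl step m) m := by
  induction l generalizing m with
  | nil => rfl
  | cons a l ih => simp [List.flatMap_cons, List.foldl_append, ih]

def cvm_posList (g : List String) : List (Nat × Nat) :=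
  (PySem.List.enumerate g 0).flatMap (fun p =>
    (PySem.List.enumerate p.2.toList 0).flatMap (fun q =>
      if q.2 ∉ (".0123456789".toList) then
        (get_surrounding_cells q.1 p.1).flatMap (fun c =>
          if 0 ≤ c.1 ∧ c.1 < (p.2.toList.length : Int) ∧ 0 ≤ c.2 ∧ c.2 < (g.length : Int)
          then [(c.2.toNat, c.1.toNat)]
          else [])
      else []))

lemma cvm_A_eq_fold (g : List String) :
    create_validity_map g =
      (cvm_posList g).foldl (fun m p => cvm_set2 m p.1 p.2)
        (g.map (fun _ => List.replicate (g.headD "").toList.length (0 : Int))) := by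
  simp only [create_validity_map, cvm_posList]
  rw [cvm_foldl_flatMap]
  congr 1
  funext m p
  rw [cvm_foldl_flatMap]
  congr 1
  funext m q
  split_ifs with hsym
  · simp
  · rw [cvm_foldl_flatMap]
    congr 1
    funext m c
    split_ifs with hg <;> simp

lemma cvm_mem_gsc (c : Int × Int) (x y : Int) :
    c ∈ get_surrounding_cells x y ↔
      ((c.1 = x - 1 ∨ c.1 = x ∨ c.1 = x + 1) ∧ (c.2 = y - 1 ∨ c.2 = y ∨ c.2 = y + 1) ∧
        ¬(c.1 = x ∧ c.2 = y)) := by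
  obtain ⟨c1, c2⟩ := c
  simp [get_surrounding_cells, cvm_offsets, Prod.ext_iff]
  omega

-- cell (j, i) is written by A's scatter iff this holds (note the bound i < len(row y):
-- a symbol only writes columns that exist in its own row)
def cvm_P (g : List String) (j i : Nat) : Prop :=
  ∃ (y x : Nat), y < g.length ∧ x < (g.getD y "").toList.length ∧
    ((g.getD y "").toList.getD x '.') ∉ (".0123456789".toList) ∧
    i < (g.getD y "").toList.length ∧
    ((j : Int) = (y : Int) - 1 ∨ (j : Int) = (y : Int) ∨ (j : Int) = (y : Int) + 1) ∧
    ((i : Int) = (x : Int) - 1 ∨ (i : Int) = (x : Int) ∨ (i : Int) = (x : Int) + 1) ∧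
    ¬((j : Int) = (y : Int) ∧ (i : Int) = (x : Int))

lemma cvm_mem_posList_iff_P (g : List String) (j i : Nat) (hj : j < g.length) :
    ((j, i) ∈ cvm_posList g ↔ cvm_P g j i) := by
  unfold cvm_posList
  constructor
  · intro hmem
    rw [List.mem_flatMap] at hmem
    obtain ⟨p, hp, hmem⟩ := hmem
    rw [PySem.List.mem_enumerate_iff] at hp
    obtain ⟨y, hy, rfl⟩ := hp
    rw [List.mem_flatMap] at hmem
    obtain ⟨q, hq, hmem⟩ := hmem
    rw [PySem.List.mem_enumerate_iff] at hq
    obtain ⟨x, hx, rfl⟩ := hq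
    have hx' : x < g[y].toList.length := hx
    have hsl : g[y].length = g[y].toList.length := by simp
    split_ifs at hmem with hs
    · simp at hmem
    · have hs' : g[y].toList[x] ∉ (".0123456789".toList) := hs
      rw [List.mem_flatMap] at hmem
      obtain ⟨c, hcmem, hmem⟩ := hmem
      rw [cvm_mem_gsc] at hcmem
      split_ifs at hmem with hg
      case neg => simp at hmem
      simp only [List.mem_singleton, Prod.mk.injEq] at hmem
      obtain ⟨hj', hi'⟩ := hmem
      obtain ⟨a, b⟩ := c
      have hga : 0 ≤ a ∧ a < (g[y].toList.length : Int) ∧ 0 ≤ b ∧ b < (g.length : Int) := by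
        simpa using hg
      have hc1 : a = (x : Int) - 1 ∨ a = (x : Int) ∨ a = (x : Int) + 1 := by
        have := hcmem.1; simp at this ⊢; omega
      have hc2 : b = (y : Int) - 1 ∨ b = (y : Int) ∨ b = (y : Int) + 1 := by
        have := hcmem.2.1; simp at this ⊢; omega
      have hc3 : ¬(a = (x : Int) ∧ b = (y : Int)) := by
        have := hcmem.2.2; simp at this ⊢; omega
      subst hj' hi'
      refine ⟨y, x, hy, ?_, ?_, ?_, by omega, by omega, by omega⟩
      · rw [List.getD_eq_getElem _ _ hy]; exact hx'
      · rw [List.getD_eq_getElem _ _ hy, List.getD_eq_getElem _ _ hx']; exact hs'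
      · rw [List.getD_eq_getElem _ _ hy]; omega
  · rintro ⟨y, x, hy, hx, hs, hi', hr1, hr2, hne⟩
    rw [List.getD_eq_getElem _ _ hy] at hx hs hi'
    rw [List.getD_eq_getElem _ _ hx] at hs
    have hsl : g[y].length = g[y].toList.length := by simp
    rw [List.mem_flatMap]
    refine ⟨((0 : Int) + (y : Int), g[y]), ?_, ?_⟩
    · rw [PySem.List.mem_enumerate_iff]; exact ⟨y, hy, rfl⟩
    · rw [List.mem_flatMap]
      refine ⟨((0 : Int) + (x : Int), g[y].toList[x]), ?_, ?_⟩
      · rw [PySem.List.mem_enumerate_iff]; exact ⟨x, hx, rfl⟩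
      · rw [if_pos (show ((0 : Int) + (x : Int), g[y].toList[x]).2 ∉
            (".0123456789".toList) from hs)]
        rw [List.mem_flatMap]
        refine ⟨((i : Int), (j : Int)), ?_, ?_⟩
        · rw [cvm_mem_gsc]
          refine ⟨by simp; omega, by simp; omega, by simp; omega⟩
        · rw [if_pos (show (0 : Int) ≤ ((i : Int), (j : Int)).1 ∧ _ from
            ⟨by simp, by simp; omega, by simp, by simp; omega⟩)]
          simp

lemma cvm_posList_bounds (g : List String) (hpre : Pre_create_validity_map g) :
    ∀ p ∈ cvm_posList g, p.1 < g.length ∧ p.2 < (g.headD "").toList.length := by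
  intro p hp
  unfold cvm_posList at hp
  rw [List.mem_flatMap] at hp
  obtain ⟨a, ha, hp⟩ := hp
  rw [PySem.List.mem_enumerate_iff] at ha
  obtain ⟨y, hy, rfl⟩ := ha
  rw [List.mem_flatMap] at hp
  obtain ⟨q, hq, hp⟩ := hp
  rw [PySem.List.mem_enumerate_iff] at hq
  obtain ⟨x, hx, rfl⟩ := hq
  have hx' : x < g[y].toList.length := hx
  split_ifs at hp with hs
  · simp at hp
  · rw [List.mem_flatMap] at hp
    obtain ⟨c, hc, hp⟩ := hp
    rw [cvm_mem_gsc] at hc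
    split_ifs at hp with hg
    case neg => simp at hp
    simp only [List.mem_singleton] at hp
    subst hp
    have hga : 0 ≤ c.1 ∧ c.1 < (g[y].toList.length : Int) ∧ 0 ≤ c.2 ∧
        c.2 < (g.length : Int) := by simpa using hg
    have hpre' := hpre y hy x (by rw [List.getD_eq_getElem _ _ hy]; exact hx') (by
      rw [List.getD_eq_getElem _ _ hy, List.getD_eq_getElem _ _ hx']; exact hs)
    rw [List.getD_eq_getElem _ _ hy] at hpre'
    have hc1 : c.1 = (x : Int) - 1 ∨ c.1 = (x : Int) ∨ c.1 = (x : Int) + 1 := by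
      have := hc.1; simp at this ⊢; omega
    refine ⟨?_, ?_⟩
    · show c.2.toNat < g.length
      omega
    · show c.1.toNat < (g.headD "").toList.length
      rcases hc1 with h | h | h
      · omega
      · omega
      · have := hpre'.2 (by omega)
        omega

-- ----- B-side lemmas: the masks as position lists -----
def cvm_sideList (r : List Char) : List Nat :=
  (PySem.List.enumerate r 0).flatMap (fun q =>
    if q.2 ∉ (".0123456789".toList) then
      [q.1 - 1, q.1 + 1].flatMap (fun nx =>
        if 0 ≤ nx ∧ nx < (r.length : Int) then [nx.toNat] else [])
    else [])

def cvm_fullList (r : List Char) : List Nat :=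
  (PySem.List.enumerate r 0).flatMap (fun q =>
    if q.2 ∉ (".0123456789".toList) then
      [q.1 - 1, q.1, q.1 + 1].flatMap (fun nx =>
        if 0 ≤ nx ∧ nx < (r.length : Int) then [nx.toNat] else [])
    else [])

lemma cvm_foldl_prod {α β γ : Type} (l : List γ) (f : α → γ → α) (g : β → γ → β)
    (a : α) (b : β) :
    l.foldl (fun sf q => (f sf.1 q, g sf.2 q)) (a, b) = (l.foldl f a, l.foldl g b) := by
  induction l generalizing a b with
  | nil => rfl
  | cons q l ih => simp only [List.foldl_cons]; exact ih _ _

lemma cvm_guard_fold (r : List Char) (L : List Int) (m : List Bool) :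
    L.foldl (fun m nx =>
        if 0 ≤ nx ∧ nx < (r.length : Int) then m.set nx.toNat true else m) m =
      (L.flatMap (fun nx =>
        if 0 ≤ nx ∧ nx < (r.length : Int) then [nx.toNat] else [])).foldl
          (fun m p => m.set p true) m := by
  rw [cvm_foldl_flatMap]
  congr 1
  funext m nx
  split_ifs <;> rfl

lemma cvm_masks_eq (r : List Char) :
    cvm_masks r =
      ((cvm_sideList r).foldl (fun m p => m.set p true) (List.replicate r.length false),
       (cvm_fullList r).foldl (fun m p => m.set p true) (List.replicate r.length false)) := by
  unfold cvm_masks cvm_sideList cvm_fullList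
  rw [cvm_foldl_flatMap, cvm_foldl_flatMap]
  refine Eq.trans ?_ (cvm_foldl_prod (PySem.List.enumerate r 0)
    (fun (m : List Bool) (q : Int × Char) =>
      (if q.2 ∉ (".0123456789".toList) then
        [q.1 - 1, q.1 + 1].flatMap (fun nx =>
          if 0 ≤ nx ∧ nx < (r.length : Int) then [nx.toNat] else [])
      else []).foldl (fun m p => m.set p true) m)
    (fun (m : List Bool) (q : Int × Char) =>
      (if q.2 ∉ (".0123456789".toList) then
        [q.1 - 1, q.1, q.1 + 1].flatMap (fun nx =>
          if 0 ≤ nx ∧ nx < (r.length : Int) then [nx.toNat] else [])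
      else []).foldl (fun m p => m.set p true) m)
    (List.replicate r.length false) (List.replicate r.length false))
  congr 1
  funext sf q
  by_cases hs : q.2 ∉ (".0123456789".toList)
  · rw [if_pos hs, if_pos hs, if_pos hs]
    exact Prod.ext (cvm_guard_fold r _ sf.1) (cvm_guard_fold r _ sf.2)
  · rw [if_neg hs, if_neg hs, if_neg hs]
    rfl

lemma cvm_set1_length (ps : List Nat) (m : List Bool) :
    (ps.foldl (fun m p => m.set p true) m).length = m.length := by
  induction ps generalizing m with
  | nil => rfl
  | cons p ps ih => rw [List.foldl_cons, ih]; simp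

lemma cvm_getD_fold_set (ps : List Nat) (m : List Bool) (i : Nat)
    (hb : ∀ p ∈ ps, p < m.length) :
    (ps.foldl (fun m p => m.set p true) m).getD i false =
      if i ∈ ps then true else m.getD i false := by
  induction ps generalizing m with
  | nil => simp
  | cons p ps ih =>
    rw [List.foldl_cons,
      ih _ (fun q hq => by simpa using hb q (List.mem_cons_of_mem _ hq))]
    by_cases hmem : i ∈ ps
    · simp [hmem]
    · by_cases hip : i = p
      · subst hip
        have := hb i List.mem_cons_self
        simp [hmem, List.getD_eq_getElem?_getD, List.getElem?_set_self this]
      · simp [hmem, hip, List.getD_eq_getElem?_getD,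
          List.getElem?_set_ne (fun h => hip h.symm)]

lemma cvm_mem_sideList (r : List Char) (i : Nat) :
    i ∈ cvm_sideList r ↔
      ∃ x : Nat, x < r.length ∧ r.getD x '.' ∉ (".0123456789".toList) ∧
        i < r.length ∧ ((i : Int) = (x : Int) - 1 ∨ (i : Int) = (x : Int) + 1) := by
  unfold cvm_sideList
  constructor
  · intro hmem
    rw [List.mem_flatMap] at hmem
    obtain ⟨q, hq, hmem⟩ := hmem
    rw [PySem.List.mem_enumerate_iff] at hq
    obtain ⟨x, hx, rfl⟩ := hq
    split_ifs at hmem with hs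
    · simp at hmem
    · rw [List.mem_flatMap] at hmem
      obtain ⟨nx, hnx, hmem⟩ := hmem
      split_ifs at hmem with hg
      case neg => simp at hmem
      simp only [List.mem_singleton] at hmem
      subst hmem
      have hnx' : nx = (0 : Int) + (x : Int) - 1 ∨ nx = (0 : Int) + (x : Int) + 1 := by
        simpa using hnx
      refine ⟨x, hx, ?_, by omega, by omega⟩
      rw [List.getD_eq_getElem _ _ hx]; exact hs
  · rintro ⟨x, hx, hs, hi, hrel⟩
    rw [List.getD_eq_getElem _ _ hx] at hs
    rw [List.mem_flatMap]
    refine ⟨((0 : Int) + (x : Int), r[x]), ?_, ?_⟩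
    · rw [PySem.List.mem_enumerate_iff]; exact ⟨x, hx, rfl⟩
    · rw [if_pos (show ((0 : Int) + (x : Int), r[x]).2 ∉ (".0123456789".toList) from hs)]
      rw [List.mem_flatMap]
      refine ⟨(i : Int), ?_, ?_⟩
      · simp; omega
      · rw [if_pos ⟨by omega, by omega⟩]
        simp

lemma cvm_mem_fullList (r : List Char) (i : Nat) :
    i ∈ cvm_fullList r ↔
      ∃ x : Nat, x < r.length ∧ r.getD x '.' ∉ (".0123456789".toList) ∧
        i < r.length ∧
        ((i : Int) = (x : Int) - 1 ∨ (i : Int) = (x : Int) ∨ (i : Int) = (x : Int) + 1) := by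
  unfold cvm_fullList
  constructor
  · intro hmem
    rw [List.mem_flatMap] at hmem
    obtain ⟨q, hq, hmem⟩ := hmem
    rw [PySem.List.mem_enumerate_iff] at hq
    obtain ⟨x, hx, rfl⟩ := hq
    split_ifs at hmem with hs
    · simp at hmem
    · rw [List.mem_flatMap] at hmem
      obtain ⟨nx, hnx, hmem⟩ := hmem
      split_ifs at hmem with hg
      case neg => simp at hmem
      simp only [List.mem_singleton] at hmem
      subst hmem
      have hnx' : nx = (0 : Int) + (x : Int) - 1 ∨ nx = (0 : Int) + (x : Int) ∨
          nx = (0 : Int) + (x : Int) + 1 := by simpa using hnx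
      refine ⟨x, hx, ?_, by omega, by omega⟩
      rw [List.getD_eq_getElem _ _ hx]; exact hs
  · rintro ⟨x, hx, hs, hi, hrel⟩
    rw [List.getD_eq_getElem _ _ hx] at hs
    rw [List.mem_flatMap]
    refine ⟨((0 : Int) + (x : Int), r[x]), ?_, ?_⟩
    · rw [PySem.List.mem_enumerate_iff]; exact ⟨x, hx, rfl⟩
    · rw [if_pos (show ((0 : Int) + (x : Int), r[x]).2 ∉ (".0123456789".toList) from hs)]
      rw [List.mem_flatMap]
      refine ⟨(i : Int), ?_, ?_⟩
      · simp; omega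
      · rw [if_pos ⟨by omega, by omega⟩]
        simp

lemma cvm_side_length (r : List Char) : (cvm_masks r).1.length = r.length := by
  rw [cvm_masks_eq]; simp [cvm_set1_length]

lemma cvm_full_length (r : List Char) : (cvm_masks r).2.length = r.length := by
  rw [cvm_masks_eq]; simp [cvm_set1_length]

lemma cvm_side_getD (r : List Char) (i : Nat) :
    ((cvm_masks r).1.getD i false = true) ↔ i ∈ cvm_sideList r := by
  rw [cvm_masks_eq]
  simp only
  rw [cvm_getD_fold_set _ _ _ (fun p hp => by
    have := ((cvm_mem_sideList r p).mp hp).choose_spec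
    simp only [List.length_replicate]
    obtain ⟨x, hx, hs, hlt, hrel⟩ := (cvm_mem_sideList r p).mp hp
    exact hlt)]
  by_cases h : i ∈ cvm_sideList r
  · simp [h]
  · simp [h, List.getD_eq_getElem?_getD, List.getElem?_replicate]
    split_ifs <;> simp

lemma cvm_full_getD (r : List Char) (i : Nat) :
    ((cvm_masks r).2.getD i false = true) ↔ i ∈ cvm_fullList r := by
  rw [cvm_masks_eq]
  simp only
  rw [cvm_getD_fold_set _ _ _ (fun p hp => by
    simp only [List.length_replicate]
    obtain ⟨x, hx, hs, hlt, hrel⟩ := (cvm_mem_fullList r p).mp hp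
    exact hlt)]
  by_cases h : i ∈ cvm_fullList r
  · simp [h]
  · simp [h, List.getD_eq_getElem?_getD, List.getElem?_replicate]
    split_ifs <;> simp

lemma cvm_getD_map (g : List String) (f : String → List Bool) (j : Nat)
    (hj : j < g.length) :
    (g.map f).getD j [] = f (g.getD j "") := by
  rw [List.getD_eq_getElem?_getD, List.getElem?_map, List.getElem?_eq_getElem hj,
    List.getD_eq_getElem _ _ hj]
  rfl

lemma cvm_hit_side (g : List String) (j : Int) (i : Nat) :
    cvm_hit (g.map (fun r => (cvm_masks r.toList).1)) j i = true ↔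
      ∃ jn : Nat, j = (jn : Int) ∧ jn < g.length ∧
        i ∈ cvm_sideList (g.getD jn "").toList := by
  unfold cvm_hit
  rw [Bool.and_eq_true, Bool.and_eq_true, decide_eq_true_iff, decide_eq_true_iff]
  constructor
  · rintro ⟨⟨⟨hj0, hjl⟩, _⟩, hget⟩
    have hjn : j.toNat < g.length := by simp at hjl; omega
    rw [cvm_getD_map g (fun r => (cvm_masks r.toList).1) _ hjn] at hget
    exact ⟨j.toNat, by omega, hjn, (cvm_side_getD _ _).mp hget⟩
  · rintro ⟨jn, rfl, hjn, hmem⟩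
    have hi : i < (g.getD jn "").toList.length := by
      obtain ⟨x, _, _, hi, _⟩ := (cvm_mem_sideList _ _).mp hmem
      exact hi
    simp only [Int.toNat_natCast]
    rw [cvm_getD_map g (fun r => (cvm_masks r.toList).1) _ hjn]
    refine ⟨⟨⟨by omega, by simp; omega⟩, ?_⟩, (cvm_side_getD _ _).mpr hmem⟩
    rw [cvm_side_length]; exact hi

lemma cvm_hit_full (g : List String) (j : Int) (i : Nat) :
    cvm_hit (g.map (fun r => (cvm_masks r.toList).2)) j i = true ↔
      ∃ jn : Nat, j = (jn : Int) ∧ jn < g.length ∧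
        i ∈ cvm_fullList (g.getD jn "").toList := by
  unfold cvm_hit
  rw [Bool.and_eq_true, Bool.and_eq_true, decide_eq_true_iff, decide_eq_true_iff]
  constructor
  · rintro ⟨⟨⟨hj0, hjl⟩, _⟩, hget⟩
    have hjn : j.toNat < g.length := by simp at hjl; omega
    rw [cvm_getD_map g (fun r => (cvm_masks r.toList).2) _ hjn] at hget
    exact ⟨j.toNat, by omega, hjn, (cvm_full_getD _ _).mp hget⟩
  · rintro ⟨jn, rfl, hjn, hmem⟩
    have hi : i < (g.getD jn "").toList.length := by
      obtain ⟨x, _, _, hi, _⟩ := (cvm_mem_fullList _ _).mp hmem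
      exact hi
    simp only [Int.toNat_natCast]
    rw [cvm_getD_map g (fun r => (cvm_masks r.toList).2) _ hjn]
    refine ⟨⟨⟨by omega, by simp; omega⟩, ?_⟩, (cvm_full_getD _ _).mpr hmem⟩
    rw [cvm_full_length]; exact hi

-- B's cell condition ↔ A's scatter condition, split by the source row j / j-1 / j+1
lemma cvm_cell_iff (g : List String) (j i : Nat) :
    (cvm_hit (g.map (fun r => (cvm_masks r.toList).1)) (j : Int) i ||
     cvm_hit (g.map (fun r => (cvm_masks r.toList).2)) ((j : Int) - 1) i ||
     cvm_hit (g.map (fun r => (cvm_masks r.toList).2)) ((j : Int) + 1) i) = true ↔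
      cvm_P g j i := by
  rw [Bool.or_eq_true, Bool.or_eq_true, cvm_hit_side, cvm_hit_full, cvm_hit_full]
  constructor
  · rintro ((⟨jn, hjj, hjn, hmem⟩ | ⟨jn, hjj, hjn, hmem⟩) | ⟨jn, hjj, hjn, hmem⟩)
    · obtain ⟨x, hx, hs, hi, hrel⟩ := (cvm_mem_sideList _ _).mp hmem
      have hjeq : jn = j := by omega
      subst hjeq
      exact ⟨jn, x, hjn, hx, hs, hi, by omega, by omega, by omega⟩
    · obtain ⟨x, hx, hs, hi, hrel⟩ := (cvm_mem_fullList _ _).mp hmem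
      exact ⟨jn, x, hjn, hx, hs, hi, by omega, by omega, by omega⟩
    · obtain ⟨x, hx, hs, hi, hrel⟩ := (cvm_mem_fullList _ _).mp hmem
      exact ⟨jn, x, hjn, hx, hs, hi, by omega, by omega, by omega⟩
  · rintro ⟨y, x, hy, hx, hs, hi, hr1, hr2, hne⟩
    rcases hr1 with h | h | h
    · right
      exact ⟨y, by omega, hy, (cvm_mem_fullList _ _).mpr ⟨x, hx, hs, hi, by omega⟩⟩
    · left; left
      refine ⟨y, by omega, hy, (cvm_mem_sideList _ _).mpr ⟨x, hx, hs, hi, by omega⟩⟩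
    · left; right
      exact ⟨y, by omega, hy, (cvm_mem_fullList _ _).mpr ⟨x, hx, hs, hi, by omega⟩⟩

lemma cvm_alt_row (g : List String) (j : Nat) (hj : j < g.length) :
    (create_validity_map_alt g).getD j [] =
      (List.range (g.headD "").toList.length).map (fun (i : Nat) =>
        if cvm_hit (g.map (fun r => (cvm_masks r.toList).1)) (j : Int) i ||
           cvm_hit (g.map (fun r => (cvm_masks r.toList).2)) ((j : Int) - 1) i ||
           cvm_hit (g.map (fun r => (cvm_masks r.toList).2)) ((j : Int) + 1) i
        then (1 : Int) else 0) := by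
  unfold create_validity_map_alt
  exact PySem.List.getD_map_range _ _ _ _ hj

lemma cvm_init_row (g : List String) (w j : Nat) (hj : j < g.length) :
    (g.map (fun _ => List.replicate w (0 : Int))).getD j [] = List.replicate w 0 := by
  rw [List.getD_eq_getElem?_getD, List.getElem?_map]
  simp [List.getElem?_eq_getElem hj]

theorem cvm_main (g : List String) (hpre : Pre_create_validity_map g) :
    create_validity_map g = create_validity_map_alt g := by
  rw [cvm_A_eq_fold]
  have hb : ∀ p ∈ cvm_posList g,
      p.1 < (g.map (fun _ => List.replicate (g.headD "").toList.length (0 : Int))).length ∧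
      p.2 < ((g.map (fun _ => List.replicate (g.headD "").toList.length (0 : Int))).getD
        p.1 []).length := by
    intro p hp
    obtain ⟨h1, h2⟩ := cvm_posList_bounds g hpre p hp
    rw [List.length_map]
    exact ⟨h1, by rw [cvm_init_row g _ _ h1]; simpa using h2⟩
  apply List.ext_getElem
  · rw [cvm_fold_length, List.length_map]
    simp [create_validity_map_alt]
  · intro j hjl hjr
    have hj : j < g.length := by rwa [cvm_fold_length, List.length_map] at hjl
    apply List.ext_getElem
    · rw [← List.getD_eq_getElem _ [] hjl, ← List.getD_eq_getElem _ [] hjr]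
      rw [cvm_fold_rowlen, cvm_init_row g _ _ hj, cvm_alt_row g j hj]
      simp
    · intro i hil hir
      have hi : i < (g.headD "").toList.length := by
        rw [← List.getD_eq_getElem _ [] hjl, cvm_fold_rowlen, cvm_init_row g _ _ hj] at hil
        simpa using hil
      rw [← cvm_get2_eq_getElem _ j i hjl hil, ← cvm_get2_eq_getElem _ j i hjr hir]
      rw [cvm_get2_fold _ _ _ _ hb]
      have hinit : cvm_get2 (g.map (fun _ =>
          List.replicate (g.headD "").toList.length (0 : Int))) j i = 0 := by
        rw [cvm_get2, cvm_init_row g _ _ hj]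
        simp [List.getD_eq_getElem?_getD]
      rw [hinit]
      have hmem := cvm_mem_posList_iff_P g j i hj
      have hany := cvm_cell_iff g j i
      have hrow : cvm_get2 (create_validity_map_alt g) j i =
          if cvm_hit (g.map (fun r => (cvm_masks r.toList).1)) (j : Int) i ||
             cvm_hit (g.map (fun r => (cvm_masks r.toList).2)) ((j : Int) - 1) i ||
             cvm_hit (g.map (fun r => (cvm_masks r.toList).2)) ((j : Int) + 1) i
          then (1 : Int) else 0 := by
        rw [cvm_get2, cvm_alt_row g j hj]
        exact PySem.List.getD_map_range _ _ _ _ hi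
      rw [hrow]
      by_cases hP : cvm_P g j i
      · rw [if_pos (hmem.mpr hP), if_pos (hany.mpr hP)]
      · rw [if_neg (fun hc => hP (hmem.mp hc)), if_neg (fun hc => hP (hany.mp hc))]

-- ===== VERDICT (by name: the statement is the Claim_ definition above) =====
theorem create_validity_map_spec : Claim_equal_create_validity_map := by
  intro g _ hpre
  exact cvm_main g hpre
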